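-- pv_equiv track=rewrite | github.com/rcsanto/Routeverify-lite | app.py | infer_borough
-- ===== SOURCE A (Python) =====
-- DISTRICT_TO_BOROUGH = {'Q':'Queens, NY','M':'Manhattan, NY','BX':'Bronx, NY','BK':'Brooklyn, NY','SI':'Staten Island, NY'}
--
-- def infer_borough(claude_json: dict) -> str:
--     district = str(claude_json.get('district', '')).upper().strip()
--     section = str(claude_json.get('section', '')).upper().strip()
--     for key, borough in DISTRICT_TO_BOROUGH.items():
--         if district.startswith(key):
--             return borough
--     for key, borough in DISTRICT_TO_BOROUGH.items():
--         if section.startswith(key):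
--             return borough
--     return 'New York, NY'
-- ===== SOURCE B (Python) =====
-- DISTRICT_TO_BOROUGH = {'Q':'Queens, NY','M':'Manhattan, NY','BX':'Bronx, NY','BK':'Brooklyn, NY','SI':'Staten Island, NY'}
--
-- def infer_borough(claude_json: dict) -> str:
--     # Direct prefix lookups instead of scanning the map: every key is 1 or 2
--     # chars and no key is a prefix of another, so checking s[:2] then s[:1]
--     # against the dict gives the same match the scan would find.
--     for field in ('district', 'section'):
--         s = str(claude_json.get(field, '')).upper().strip()
--         hit = DISTRICT_TO_BOROUGH.get(s[:2]) or DISTRICT_TO_BOROUGH.get(s[:1])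
--         if hit:
--             return hit
--     return 'New York, NY'
-- ===== Notes on version B (the rewrite author's own statement) =====
-- stated objective: simpler
-- what changed: Replaced the two linear startswith-scans over the borough map by direct dict lookups of the normalized string's 2-char and 1-char prefixes (valid because all keys have length 1 or 2 and none is a prefix of another), iterating the two fields in one small loop.
import Mathlib
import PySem

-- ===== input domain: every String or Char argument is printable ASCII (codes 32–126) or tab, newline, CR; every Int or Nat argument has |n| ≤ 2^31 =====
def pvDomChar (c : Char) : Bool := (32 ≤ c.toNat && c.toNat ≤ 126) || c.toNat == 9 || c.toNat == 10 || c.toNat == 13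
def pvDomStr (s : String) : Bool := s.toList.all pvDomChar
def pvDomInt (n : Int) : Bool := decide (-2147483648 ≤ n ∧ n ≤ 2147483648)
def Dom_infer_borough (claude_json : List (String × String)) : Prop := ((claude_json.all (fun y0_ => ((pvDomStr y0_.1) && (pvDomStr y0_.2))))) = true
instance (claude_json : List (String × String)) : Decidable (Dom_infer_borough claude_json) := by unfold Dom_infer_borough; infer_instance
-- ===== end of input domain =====

-- B replaces A's startswith-scans over the borough map by direct dict lookups
-- of the 2-char and 1-char prefixes (simpler; valid since all keys have length
-- 1 or 2 and none is a prefix of another).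

-- the module-level DISTRICT_TO_BOROUGH map (shared data)
def pvBoroughTable : List (String × String) :=
  [("Q", "Queens, NY"), ("M", "Manhattan, NY"), ("BX", "Bronx, NY"),
   ("BK", "Brooklyn, NY"), ("SI", "Staten Island, NY")]

-- ===== PORT A =====
-- 'for key, borough in DISTRICT_TO_BOROUGH.items(): if s.startswith(key): return borough'
def pvScanA (s : String) : List (String × String) → Option String
  | [] => none
  | (k, b) :: rest => if PySem.Str.startswith s k then some b else pvScanA s rest

def infer_borough (claude_json : List (String × String)) : String :=
  let district := PySem.Str.strip (PySem.Str.upper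
    (PySem.Dict.getD (PySem.Dict.ofList claude_json) "district" ""))
  let sect := PySem.Str.strip (PySem.Str.upper
    (PySem.Dict.getD (PySem.Dict.ofList claude_json) "section" ""))
  match pvScanA district pvBoroughTable with
  | some b => b
  | none =>
    match pvScanA sect pvBoroughTable with
    | some b => b
    | none => "New York, NY"

-- ===== PORT B =====
def pvBoroughDict : PySem.Dict String String := PySem.Dict.mk pvBoroughTable

-- 'DISTRICT_TO_BOROUGH.get(s[:2]) or DISTRICT_TO_BOROUGH.get(s[:1])'
-- (all dict values are non-empty, so Python's 'or' is first-some on Options)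
def pvLookupB (s : String) : Option String :=
  match PySem.Dict.get? pvBoroughDict (PySem.Str.slice s none (some 2)) with
  | some b => some b
  | none => PySem.Dict.get? pvBoroughDict (PySem.Str.slice s none (some 1))

-- 'for field in (district, section): … if hit: return hit'
def pvGoB : List String → String
  | [] => "New York, NY"
  | raw :: rest => (pvLookupB (PySem.Str.strip (PySem.Str.upper raw))).getD (pvGoB rest)

def infer_borough_alt (claude_json : List (String × String)) : String :=
  pvGoB [PySem.Dict.getD (PySem.Dict.ofList claude_json) "district" "",
         PySem.Dict.getD (PySem.Dict.ofList claude_json) "section" ""]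

-- ===== PRECONDITION & SPEC =====
def Spec_infer_borough (claude_json : List (String × String)) (out : String) : Prop := out = infer_borough_alt claude_json
instance (claude_json : List (String × String)) (out : String) : Decidable (Spec_infer_borough claude_json out) := by unfold Spec_infer_borough; infer_instance

-- ===== CLAIM (what is proved, stated in full; the proofs are below) =====
def Claim_equal_infer_borough : Prop := ∀ (claude_json : List (String × String)), Dom_infer_borough claude_json → Spec_infer_borough claude_json (infer_borough claude_json)

-- ===== LEMMAS AND PROOFS =====

-- the heart: scanning the table with startswith = looking up the 2- then 1-char prefix
theorem get?_table (key : String) : PySem.Dict.get? pvBoroughDict key =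
    if key = "Q" then some "Queens, NY" else if key = "M" then some "Manhattan, NY"
    else if key = "BX" then some "Bronx, NY" else if key = "BK" then some "Brooklyn, NY"
    else if key = "SI" then some "Staten Island, NY" else none := by
  simp only [pvBoroughDict, pvBoroughTable, PySem.Dict.get?_mk_cons, beq_iff_eq]
  simp [PySem.Dict.get?, eq_comm]
theorem slice_take (s : String) (n : Nat) :
    PySem.Str.slice s none (some (n : Int)) = String.ofList (s.toList.take n) := by
  rw [String.ext_iff]
  simp [pysem]
theorem ofList_eq_lit (l : List Char) (t : String) : (String.ofList l = t) ↔ l = t.toList := by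
  rw [String.ext_iff]; simp

theorem litflip (a : Char) : ∀ c : Char, (a = c) = (c = a) := fun _ => propext eq_comm

set_option maxHeartbeats 2000000 in
theorem pvScan_eq_lookup (s : String) : pvScanA s pvBoroughTable = pvLookupB s := by
  have h2 := slice_take s 2
  have h1 := slice_take s 1
  norm_num at h2 h1
  have tQ : "Q".toList = ['Q'] := rfl
  have tM : "M".toList = ['M'] := rfl
  have tBX : "BX".toList = ['B','X'] := rfl
  have tBK : "BK".toList = ['B','K'] := rfl
  have tSI : "SI".toList = ['S','I'] := rfl
  simp only [pvScanA, pvBoroughTable, pvLookupB, h1, h2, get?_table]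
  rcases hc : s.toList with _ | ⟨c, _ | ⟨d, rest⟩⟩
  · simp only [PySem.Str.startswith_eq, hc]
    decide
  · simp only [PySem.Str.startswith_eq, hc, ofList_eq_lit,
      tQ, tM, tBX, tBK, tSI, List.take_succ_cons, List.take_nil]
    simp only [PySem.Chars.startswith, List.isPrefixOf, Bool.and_eq_true, beq_iff_eq,
      List.cons.injEq, and_true, litflip 'Q', litflip 'M', litflip 'B', litflip 'S']
    split_ifs <;> simp_all
  · simp only [PySem.Str.startswith_eq, hc]
    simp only [List.take_succ_cons, List.take_zero, ofList_eq_lit, tQ, tM, tBX, tBK, tSI]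
    simp only [PySem.Chars.startswith, List.isPrefixOf, Bool.and_eq_true, beq_iff_eq,
      List.cons.injEq, and_true, litflip 'Q', litflip 'M', litflip 'B', litflip 'X',
      litflip 'K', litflip 'S', litflip 'I']
    split_ifs <;> simp_all

-- ===== VERDICT (by name: the statement is the Claim_ definition above) =====
theorem infer_borough_spec : Claim_equal_infer_borough := by
  intro cj _
  show infer_borough cj = infer_borough_alt cj
  unfold infer_borough infer_borough_alt
  simp only [pvGoB, ← pvScan_eq_lookup]
  cases pvScanA (PySem.Str.strip (PySem.Str.upper
      ((PySem.Dict.ofList cj).getD "district" ""))) pvBoroughTable <;>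
    cases pvScanA (PySem.Str.strip (PySem.Str.upper
      ((PySem.Dict.ofList cj).getD "section" ""))) pvBoroughTable <;> rfl
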